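-- pv_equiv track=rewrite | github.com/pawel2000pl/GrafyLab | graphs.py | graphMiniMaxCenterFromDistanceMatrix
-- ===== SOURCE A (Python) =====
-- def graphMiniMaxCenterFromDistanceMatrix(distanceMatrix):
--
--     maxDistancetoFarthestVertex = {}
--     finalTotalDistance = {}
--     for index, row in enumerate(distanceMatrix, start=1): # wierzcholki liczymy od 1
--         maxDistancetoFarthestVertex[index] = max(row)
--
--     minVal = min(maxDistancetoFarthestVertex.values())
--     indexes_of_centre_vertices = [k for k, v in maxDistancetoFarthestVertex.items() if v == minVal]
--     for i in indexes_of_centre_vertices: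
--         finalTotalDistance[i] = minVal
--
--     return finalTotalDistance
-- ===== SOURCE B (Python) =====
-- def graphMiniMaxCenterFromDistanceMatrix(distanceMatrix):
--     best = None
--     centers = []
--     for i, row in enumerate(distanceMatrix, start=1):
--         m = max(row)
--         if best is None or m < best:
--             best = m
--             centers = [i]
--         elif m == best:
--             centers.append(i)
--     return {i: best for i in centers}
-- ===== Notes on version B (the rewrite author's own statement) =====
-- stated objective: simpler
-- what changed: One online pass keeping the running minimum of row maxima and the list of indices achieving it, instead of building a full index->max dict, taking min over its values, filtering, and building a second dict.
import Mathlib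
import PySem

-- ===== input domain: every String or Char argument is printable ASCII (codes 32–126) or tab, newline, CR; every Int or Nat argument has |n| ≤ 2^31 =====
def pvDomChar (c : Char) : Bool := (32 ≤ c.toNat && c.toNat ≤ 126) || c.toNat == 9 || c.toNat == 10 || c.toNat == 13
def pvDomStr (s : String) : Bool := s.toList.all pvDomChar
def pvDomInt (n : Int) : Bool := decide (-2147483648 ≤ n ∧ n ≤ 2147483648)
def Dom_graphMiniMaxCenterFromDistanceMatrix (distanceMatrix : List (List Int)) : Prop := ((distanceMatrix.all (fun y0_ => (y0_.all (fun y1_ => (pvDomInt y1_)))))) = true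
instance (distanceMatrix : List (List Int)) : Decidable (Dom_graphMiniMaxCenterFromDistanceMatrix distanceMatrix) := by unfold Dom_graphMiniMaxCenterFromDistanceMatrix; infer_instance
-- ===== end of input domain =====

-- B replaces A's build-dict / min-over-values / filter / rebuild-dict pipeline by a single
-- online pass keeping the running minimum of the row maxima and the indices achieving it (objective: simpler).

-- ===== PORT A =====
def graphMiniMaxCenterFromDistanceMatrix (distanceMatrix : List (List Int)) : List (Int × Int) :=
  -- maxDistancetoFarthestVertex[index] = max(row), indices from 1
  let maxD : PySem.Dict Int Int :=
    (PySem.List.enumerate distanceMatrix 1).foldl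
      (fun d p => d.insert p.1 ((PySem.List.max? p.2 (fun x => x)).getD 0)) PySem.Dict.empty
  -- minVal = min(maxDistancetoFarthestVertex.values())
  let minVal : Int := (PySem.List.min? maxD.values (fun x => x)).getD 0
  -- indexes_of_centre_vertices = [k for k, v in … .items() if v == minVal]
  let idxs : List Int := (maxD.items.filter (fun p => p.2 == minVal)).map (fun p => p.1)
  -- finalTotalDistance[i] = minVal for each i
  let finalD : PySem.Dict Int Int := idxs.foldl (fun d i => d.insert i minVal) PySem.Dict.empty
  finalD.items

-- ===== PORT B =====
def graphMiniMaxCenterFromDistanceMatrix_alt (distanceMatrix : List (List Int)) : List (Int × Int) :=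
  let st : Option Int × List Int :=
    (PySem.List.enumerate distanceMatrix 1).foldl
      (fun st p =>
        let m : Int := (PySem.List.max? p.2 (fun x => x)).getD 0
        match st.1 with
        | none => (some m, [p.1])
        | some b =>
          if m < b then (some m, [p.1])
          else if m == b then (some b, st.2 ++ [p.1])
          else st)
      (none, [])
  match st.1 with
  | none => []
  | some b => (st.2.foldl (fun d i => d.insert i b) PySem.Dict.empty).items

-- ===== PRECONDITION & SPEC =====
-- Pre_ excludes the inputs on which Python A raises ValueError: the empty matrix (min() of an
-- empty sequence) and matrices containing an empty row (max() of an empty sequence).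
def Pre_graphMiniMaxCenterFromDistanceMatrix (distanceMatrix : List (List Int)) : Prop :=
  distanceMatrix ≠ [] ∧ ∀ r ∈ distanceMatrix, r ≠ []
instance (distanceMatrix : List (List Int)) : Decidable (Pre_graphMiniMaxCenterFromDistanceMatrix distanceMatrix) := by unfold Pre_graphMiniMaxCenterFromDistanceMatrix; infer_instance
def pvWitness_graphMiniMaxCenterFromDistanceMatrix : List (List Int) := [[0, 3], [2, 1]]

def Spec_graphMiniMaxCenterFromDistanceMatrix (distanceMatrix : List (List Int)) (out : List (Int × Int)) : Prop := out = graphMiniMaxCenterFromDistanceMatrix_alt distanceMatrix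
instance (distanceMatrix : List (List Int)) (out : List (Int × Int)) : Decidable (Spec_graphMiniMaxCenterFromDistanceMatrix distanceMatrix out) := by unfold Spec_graphMiniMaxCenterFromDistanceMatrix; infer_instance

-- ===== CLAIM (what is proved, stated in full; the proofs are below) =====
def Claim_equal_graphMiniMaxCenterFromDistanceMatrix : Prop := ∀ (distanceMatrix : List (List Int)), Dom_graphMiniMaxCenterFromDistanceMatrix distanceMatrix → Pre_graphMiniMaxCenterFromDistanceMatrix distanceMatrix → Spec_graphMiniMaxCenterFromDistanceMatrix distanceMatrix (graphMiniMaxCenterFromDistanceMatrix distanceMatrix)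


-- ===== LEMMAS AND PROOFS =====

-- max(row) as both ports compute it
def pvM (r : List Int) : Int := (PySem.List.max? r (fun x => x)).getD 0

-- the loop body of port B, named for the proofs (definitionally the port's lambda)
def pvStepB (st : Option Int × List Int) (p : Int × List Int) : Option Int × List Int :=
  match st.1 with
  | none => (some (pvM p.2), [p.1])
  | some b =>
    if pvM p.2 < b then (some (pvM p.2), [p.1])
    else if pvM p.2 == b then (some b, st.2 ++ [p.1])
    else st

-- A's first dict and its min, named for the proofs (definitionally the port's lets)
def pvMaxD (dm : List (List Int)) : PySem.Dict Int Int :=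
  (PySem.List.enumerate dm 1).foldl (fun d p => d.insert p.1 (pvM p.2)) PySem.Dict.empty
def pvMinVal (dm : List (List Int)) : Int :=
  (PySem.List.min? (pvMaxD dm).values (fun x => x)).getD 0

theorem portA_def (dm : List (List Int)) :
    graphMiniMaxCenterFromDistanceMatrix dm =
      (((((pvMaxD dm).items.filter (fun p => p.2 == pvMinVal dm)).map (fun p => p.1)).foldl
          (fun d i => d.insert i (pvMinVal dm)) PySem.Dict.empty).items) := rfl

theorem portB_def (dm : List (List Int)) :
    graphMiniMaxCenterFromDistanceMatrix_alt dm =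
      (match ((PySem.List.enumerate dm 1).foldl pvStepB ((none : Option Int), ([] : List Int))).1 with
       | none => []
       | some b =>
         ((((PySem.List.enumerate dm 1).foldl pvStepB ((none : Option Int), ([] : List Int))).2).foldl
            (fun d i => d.insert i b) PySem.Dict.empty).items) := rfl

theorem pv_foldl_min_le (l : List Int) (b : Int) : l.foldl min b ≤ b := by
  induction l generalizing b with
  | nil => simp
  | cons x t ih => exact le_trans (ih (min b x)) (min_le_left b x)

-- B's loop from a `some` state: running minimum of the row maxima, and the indices achieving it
theorem pv_foldB (l : List (Int × List Int)) (b : Int) (cs : List Int) :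
    l.foldl pvStepB (some b, cs)
    = (some ((l.map (fun p => pvM p.2)).foldl min b),
       (if (l.map (fun p => pvM p.2)).foldl min b < b then [] else cs)
         ++ (l.filter (fun p => pvM p.2 == (l.map (fun p => pvM p.2)).foldl min b)).map (fun p => p.1)) := by
  induction l generalizing b cs with
  | nil => simp
  | cons p t ih =>
    simp only [List.foldl_cons, List.map_cons, List.filter_cons]
    rcases lt_trichotomy (pvM p.2) b with h1 | h1 | h1
    · -- m < b : reset
      have hstep : pvStepB (some b, cs) p = (some (pvM p.2), [p.1]) := by
        simp [pvStepB, h1]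
      have hmin : min b (pvM p.2) = pvM p.2 := min_eq_right h1.le
      rw [hstep, ih]
      simp only [hmin]
      have hB : (t.map (fun p => pvM p.2)).foldl min (pvM p.2) ≤ pvM p.2 := pv_foldl_min_le _ _
      have hlt : (t.map (fun p => pvM p.2)).foldl min (pvM p.2) < b := lt_of_le_of_lt hB h1
      rw [if_pos hlt]
      by_cases h2 : pvM p.2 = (t.map (fun p => pvM p.2)).foldl min (pvM p.2)
      · rw [if_neg (by omega), if_pos (by simpa using h2)]
        simp
      · rw [if_pos (by omega), if_neg (by simpa using h2)]
    · -- m = b : append the index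
      have hstep : pvStepB (some b, cs) p = (some b, cs ++ [p.1]) := by
        simp [pvStepB, h1]
      have hmin : min b (pvM p.2) = b := by omega
      rw [hstep, ih]
      simp only [hmin]
      have hB : (t.map (fun p => pvM p.2)).foldl min b ≤ b := pv_foldl_min_le _ _
      by_cases h2 : (t.map (fun p => pvM p.2)).foldl min b < b
      · rw [if_pos h2, if_pos h2, if_neg (by simp only [beq_iff_eq]; omega)]
      · rw [if_neg h2, if_neg h2, if_pos (by simp only [beq_iff_eq]; omega)]
        simp
    · -- m > b : keep the state
      have hstep : pvStepB (some b, cs) p = (some b, cs) := by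
        have h3 : ¬ pvM p.2 < b := by omega
        have h4 : ¬ (pvM p.2 == b) = true := by simp only [beq_iff_eq]; omega
        simp [pvStepB, h3, h4]
      have hmin : min b (pvM p.2) = b := min_eq_left h1.le
      rw [hstep, ih]
      simp only [hmin]
      have hB : (t.map (fun p => pvM p.2)).foldl min b ≤ b := pv_foldl_min_le _ _
      rw [if_neg (show ¬ (pvM p.2 == (t.map (fun p => pvM p.2)).foldl min b) = true by
        simp only [beq_iff_eq]; omega)]

-- keys of enumerate are pairwise distinct
theorem pv_nodup_fst_enumerate (xs : List (List Int)) (s : Int) :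
    ((PySem.List.enumerate xs s).map (fun p => p.1)).Nodup := by
  have h := PySem.List.pairwise_lt_enumerate (xs := xs) (s := s)
  have h2 : ((PySem.List.enumerate xs s).map (fun p => p.1)).Pairwise (· < ·) :=
    (List.pairwise_map).mpr h
  exact List.Pairwise.imp (fun hlt => ne_of_lt hlt) h2

theorem pv_AB (distanceMatrix : List (List Int)) :
    graphMiniMaxCenterFromDistanceMatrix distanceMatrix
      = graphMiniMaxCenterFromDistanceMatrix_alt distanceMatrix := by
  cases distanceMatrix with
  | nil => rfl
  | cons r rest =>
    -- the intermediate dict is an append of fresh distinct keys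
    have hitems : (pvMaxD (r :: rest)).items
        = (((1 : Int), r) :: PySem.List.enumerate rest 2).map (fun p => (p.1, pvM p.2)) := by
      have h := PySem.Dict.items_foldl_insert_fresh
        (l := PySem.List.enumerate (r :: rest) 1)
        (k := fun p => p.1) (v := fun p => pvM p.2) (d := PySem.Dict.empty)
        (by intro a _; exact PySem.Dict.contains_empty _)
        (pv_nodup_fst_enumerate (r :: rest) 1)
      rw [PySem.List.enumerate_cons] at h
      simpa [pvMaxD, PySem.List.enumerate_cons] using h
    -- min over the dict values = running minimum of the row maxima
    have hval : pvMinVal (r :: rest)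
        = ((PySem.List.enumerate rest 2).map (fun p => pvM p.2)).foldl min (pvM r) := by
      have hv : (pvMaxD (r :: rest)).values = (pvMaxD (r :: rest)).items.map (fun p => p.2) := rfl
      rw [pvMinVal, hv, hitems]
      simp only [List.map_cons, List.map_map, PySem.List.min?_id_cons, Option.getD_some]
      rfl
    set V : Int := ((PySem.List.enumerate rest 2).map (fun p => pvM p.2)).foldl min (pvM r) with hV
    have hVle : V ≤ pvM r := pv_foldl_min_le _ _
    -- the centre-index list, as both ports produce it
    set C : List Int :=
      ((((1 : Int), r) :: PySem.List.enumerate rest 2).filter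
        (fun p => pvM p.2 == V)).map (fun p => p.1) with hC
    -- B's loop computes (some V, C)
    have hfold : (PySem.List.enumerate (r :: rest) 1).foldl pvStepB
        ((none : Option Int), ([] : List Int)) = (some V, C) := by
      rw [PySem.List.enumerate_cons, List.foldl_cons]
      have h0 : pvStepB ((none : Option Int), ([] : List Int)) ((1 : Int), r)
          = (some (pvM r), [(1 : Int)]) := rfl
      rw [h0, pv_foldB, show (1 : Int) + 1 = 2 by norm_num, ← hV]
      refine Prod.ext rfl ?_
      simp only
      rw [hC, List.filter_cons]
      by_cases h2 : pvM r = V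
      · rw [if_neg (by omega), if_pos (by simpa using h2)]
        simp
      · rw [if_pos (by omega), if_neg (by simpa using h2)]
        simp
    -- A's filtered index list is also C
    have hidx : ((pvMaxD (r :: rest)).items.filter
          (fun p => p.2 == pvMinVal (r :: rest))).map (fun p => p.1) = C := by
      rw [hitems, hC, List.filter_map, List.map_map, hval]
      rfl
    rw [portA_def, portB_def, hfold]
    show ((((pvMaxD (r :: rest)).items.filter (fun p => p.2 == pvMinVal (r :: rest))).map
        (fun p => p.1)).foldl (fun d i => d.insert i (pvMinVal (r :: rest))) PySem.Dict.empty).items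
      = (C.foldl (fun d i => d.insert i V) PySem.Dict.empty).items
    rw [hidx, hval]

-- ===== VERDICT (by name: the statement is the Claim_ definition above) =====
theorem graphMiniMaxCenterFromDistanceMatrix_spec : Claim_equal_graphMiniMaxCenterFromDistanceMatrix := by
  intro dm _ _
  unfold Spec_graphMiniMaxCenterFromDistanceMatrix
  exact pv_AB dm
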